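-- pv_equiv track=rewrite | github.com/Blanwhit/Waffle-Solver | find_swaps.py | generate_all_unique_combinations
-- ===== SOURCE A (Python) =====
-- def generate_all_unique_combinations(letters):
--     letter_freq = {}
--     for letter in letters:
--         letter_freq[letter] = letter_freq.get(letter, 0) + 1
--
--     def get_possible_numbers(letter):
--         return list(range(1, letter_freq[letter] + 1))
--
--     def generate_combinations(current_position, used_numbers):
--         if current_position == len(letters):
--             return [[]]
--
--         current_letter = letters[current_position]
--         available_numbers = get_possible_numbers(current_letter)
--         results = []
--
--         used_for_letter = used_numbers.get(current_letter, set())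
--
--         for num in available_numbers:
--             if num not in used_for_letter:
--                 new_used = {k: v.copy() for k, v in used_numbers.items()}
--                 if current_letter not in new_used:
--                     new_used[current_letter] = set()
--                 new_used[current_letter].add(num)
--
--                 next_combinations = generate_combinations(
--                     current_position + 1, new_used
--                 )
--
--                 for combo in next_combinations:
--                     results.append([f"{current_letter}{num}"] + combo)
--
--         return results
--
--     return generate_combinations(0, {})
-- ===== SOURCE B (Python) =====
-- def generate_all_unique_combinations(letters):
--     letter_freq = {}
--     for letter in letters:
--         letter_freq[letter] = letter_freq.get(letter, 0) + 1
--
--     # one sorted list of still-available numbers per letter, mutated in place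
--     remaining = {letter: list(range(1, f + 1)) for letter, f in letter_freq.items()}
--
--     results = []
--     path = []
--     n = len(letters)
--
--     def backtrack(pos):
--         if pos == n:
--             results.append(path[:])
--             return
--         ch = letters[pos]
--         nums = remaining[ch]
--         for i in range(len(nums)):
--             num = nums[i]
--             del nums[i]
--             path.append(f"{ch}{num}")
--             backtrack(pos + 1)
--             path.pop()
--             nums.insert(i, num)
--
--     backtrack(0)
--     return results
-- ===== Notes on version B (the rewrite author's own statement) =====
-- stated objective: alternative
-- what changed: Replaces A's per-branch deep copy of the whole dict-of-used-number-sets with in-place backtracking over one remaining-numbers list per letter (delete/re-insert around the recursive call) and a shared path accumulator that emits complete labelings at the leaves.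
import Mathlib
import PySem

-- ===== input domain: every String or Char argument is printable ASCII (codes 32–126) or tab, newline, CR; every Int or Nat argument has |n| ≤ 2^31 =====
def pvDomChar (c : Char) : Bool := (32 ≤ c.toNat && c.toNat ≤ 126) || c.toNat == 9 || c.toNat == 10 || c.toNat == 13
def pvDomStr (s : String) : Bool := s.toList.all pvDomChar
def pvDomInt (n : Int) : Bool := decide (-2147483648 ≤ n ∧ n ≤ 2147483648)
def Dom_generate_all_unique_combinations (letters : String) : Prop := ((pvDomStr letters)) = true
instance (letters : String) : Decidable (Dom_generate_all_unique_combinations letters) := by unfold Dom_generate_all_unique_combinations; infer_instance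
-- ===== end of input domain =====

-- B replaces A's per-branch deep copy of the dict of used-number sets by in-place
-- backtracking on one remaining-numbers list per letter; B's Python mutates only its
-- own local state, so only the return value is at issue, and it is proved equal to A's.

-- f"{current_letter}{num}" — shared by both Pythons verbatim
def pvTag (c : Char) (num : Int) : String := String.ofList (c :: PySem.Int.toChars num)

-- the letter_freq counting loop, identical in both Pythons
def pvBuildFreq (l : List Char) : PySem.Dict Char Int :=
  l.foldl (fun d ch => d.insert ch (d.getD ch 0 + 1)) PySem.Dict.empty

-- ===== PORT A =====
-- generate_combinations(current_position, used_numbers); the position scan is the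
-- structural recursion on the suffix of letters.  letter_freq[letter] is ported as
-- getD _ 0: every letter reached occurs in letters, so the key is always present.
def pvGenA (freq : PySem.Dict Char Int) : List Char → PySem.Dict Char (PySem.Set Int) → List (List String)
  | [], _ => [[]]
  | c :: ls, used =>
      let avail : List Int := PySem.List.pyRange 1 (freq.getD c 0 + 1) 1
      let uset : PySem.Set Int := (used.get? c).getD PySem.Set.empty
      avail.foldl (fun res num =>
        if !(PySem.Set.contains uset num) then
          res ++ (pvGenA freq ls (used.insert c (PySem.Set.add uset num))).map
            (fun combo => pvTag c num :: combo)
        else res) []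

def generate_all_unique_combinations (letters : String) : List (List String) :=
  pvGenA (pvBuildFreq letters.toList) letters.toList PySem.Dict.empty

-- ===== PORT B =====
-- backtrack(pos): Python's in-place `del nums[i] … nums.insert(i, num)` around the
-- recursive call is rendered by passing the state with entry c set to nums.eraseIdx i
-- (the state is restored on return, so each loop iteration sees the original nums);
-- `path.append/pop` becomes the path parameter, `results.append(path[:])` the acc.
def pvGenB : List Char → PySem.Dict Char (List Int) → List String → List (List String) → List (List String)
  | [], _, path, acc => acc ++ [path]
  | c :: ls, rem, path, acc =>
      let nums : List Int := (rem.get? c).getD []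
      (PySem.List.enumerate nums).foldl
        (fun a p =>
          pvGenB ls (rem.insert c (nums.eraseIdx p.1.toNat)) (path ++ [pvTag c p.2]) a)
        acc

def generate_all_unique_combinations_alt (letters : String) : List (List String) :=
  let lf := pvBuildFreq letters.toList
  -- remaining = {letter: list(range(1, f + 1)) for letter, f in letter_freq.items()}
  let remaining := lf.items.foldl
    (fun d p => d.insert p.1 (PySem.List.pyRange 1 (p.2 + 1) 1)) PySem.Dict.empty
  pvGenB letters.toList remaining [] []

-- ===== PRECONDITION & SPEC =====
def Spec_generate_all_unique_combinations (letters : String) (out : List (List String)) : Prop := out = generate_all_unique_combinations_alt letters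
instance (letters : String) (out : List (List String)) : Decidable (Spec_generate_all_unique_combinations letters out) := by unfold Spec_generate_all_unique_combinations; infer_instance

-- ===== CLAIM (what is proved, stated in full; the proofs are below) =====
def Claim_equal_generate_all_unique_combinations : Prop := ∀ (letters : String), Dom_generate_all_unique_combinations letters → Spec_generate_all_unique_combinations letters (generate_all_unique_combinations letters)

-- ===== LEMMAS AND PROOFS =====

-- B's available-numbers list for letter c equals A's range filtered by A's used set.
def pvRel (freq : PySem.Dict Char Int) (rem : PySem.Dict Char (List Int))
    (used : PySem.Dict Char (PySem.Set Int)) : Prop :=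
  ∀ c : Char, (rem.get? c).getD [] =
    (PySem.List.pyRange 1 (freq.getD c 0 + 1) 1).filter
      (fun n => !(PySem.Set.contains ((used.get? c).getD PySem.Set.empty) n))

lemma pvEraseIdx_append (pre : List Int) (x : Int) (t : List Int) :
    (pre ++ x :: t).eraseIdx pre.length = pre ++ t := by
  induction pre with
  | nil => rfl
  | cons y ys ih => simpa using ih

-- a fold over enumerate(nums) that deletes index i equals a fold over nums erasing the element
lemma pvEnumFold {α : Type} (F : List Int → Int → α → α) :
    ∀ (l pre : List Int), l.Nodup → ∀ (a : α),
      (PySem.List.enumerate l (pre.length : Int)).foldl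
          (fun acc p => F ((pre ++ l).eraseIdx p.1.toNat) p.2 acc) a
        = l.foldl (fun acc num => F (pre ++ l.erase num) num acc) a := by
  intro l
  induction l with
  | nil => intro pre _ a; simp [PySem.List.enumerate_nil]
  | cons x t ih =>
      intro pre hnd a
      rw [PySem.List.enumerate_cons]
      simp only [List.foldl_cons, Int.toNat_natCast, pvEraseIdx_append, List.erase_cons_head]
      have hx : x ∉ t := (List.nodup_cons.mp hnd).1
      have ht : t.Nodup := (List.nodup_cons.mp hnd).2
      have hlen : ((pre.length : Int) + 1) = ((pre ++ [x]).length : Int) := by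
        simp
      rw [hlen]
      have happ : pre ++ x :: t = (pre ++ [x]) ++ t := by simp
      rw [show (fun (acc : α) (p : Int × Int) => F ((pre ++ x :: t).eraseIdx p.1.toNat) p.2 acc)
            = (fun acc p => F (((pre ++ [x]) ++ t).eraseIdx p.1.toNat) p.2 acc) by rw [happ]]
      rw [ih (pre ++ [x]) ht]
      refine PySem.List.foldl_congr_mem t _ _ _ ?_
      intro acc num hmem
      have hne : x ≠ num := fun h => hx (h ▸ hmem)
      simp [hne]

lemma pvRel_step (freq : PySem.Dict Char Int) (rem : PySem.Dict Char (List Int))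
    (used : PySem.Dict Char (PySem.Set Int)) (c : Char) (num : Int)
    (h : pvRel freq rem used) :
    pvRel freq (rem.insert c (((rem.get? c).getD []).erase num))
      (used.insert c (PySem.Set.add ((used.get? c).getD PySem.Set.empty) num)) := by
  intro c'
  by_cases hc : c' = c
  · subst hc
    rw [PySem.Dict.get?_insert_self, PySem.Dict.get?_insert_self]
    simp only [Option.getD_some]
    have hnd : ((rem.get? c').getD []).Nodup := by
      rw [h c']; exact (PySem.List.nodup_pyRange_one 1 _).filter _
    rw [List.Nodup.erase_eq_filter hnd, h c', List.filter_filter]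
    refine List.filter_congr ?_
    intro n _
    by_cases hn : n ∈ (used.get? c').getD PySem.Set.empty <;>
      by_cases hnn : n = num <;>
        simp [PySem.Set.mem_add, hnn]
  · rw [PySem.Dict.get?_insert_of_ne _ _ hc, PySem.Dict.get?_insert_of_ne _ _ hc]
    exact h c'

-- zeta-reduced equations for the cons cases of the two ports (rfl)
lemma pvGenA_cons (freq : PySem.Dict Char Int) (c : Char) (ls : List Char)
    (used : PySem.Dict Char (PySem.Set Int)) :
    pvGenA freq (c :: ls) used =
      (PySem.List.pyRange 1 (freq.getD c 0 + 1) 1).foldl (fun res num =>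
        if !(PySem.Set.contains ((used.get? c).getD PySem.Set.empty) num) then
          res ++ (pvGenA freq ls (used.insert c
              (PySem.Set.add ((used.get? c).getD PySem.Set.empty) num))).map
            (fun combo => pvTag c num :: combo)
        else res) [] := rfl

lemma pvGenB_cons (c : Char) (ls : List Char) (rem : PySem.Dict Char (List Int))
    (path : List String) (acc : List (List String)) :
    pvGenB (c :: ls) rem path acc =
      (PySem.List.enumerate ((rem.get? c).getD [])).foldl
        (fun a p => pvGenB ls (rem.insert c (((rem.get? c).getD []).eraseIdx p.1.toNat))
          (path ++ [pvTag c p.2]) a) acc := rfl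

-- main invariant: B's backtracking produces A's results, prefixed by path, after acc
lemma pvGenBA (freq : PySem.Dict Char Int) :
    ∀ (ls : List Char) (rem : PySem.Dict Char (List Int))
      (used : PySem.Dict Char (PySem.Set Int)) (path : List String) (acc : List (List String)),
      pvRel freq rem used →
      pvGenB ls rem path acc = acc ++ (pvGenA freq ls used).map (fun combo => path ++ combo) := by
  intro ls
  induction ls with
  | nil => intro rem used path acc _; simp [pvGenB, pvGenA]
  | cons c ls ih =>
      intro rem used path acc hrel
      have hnums := hrel c
      have hnd : ((rem.get? c).getD []).Nodup := by
        rw [hnums]; exact (PySem.List.nodup_pyRange_one 1 _).filter _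
      -- B side: enumerate/eraseIdx loop → erase loop → (by ih) append loop → flatMap
      rw [pvGenB_cons]
      have hB := pvEnumFold
        (fun l' num a => pvGenB ls (rem.insert c l') (path ++ [pvTag c num]) a)
        ((rem.get? c).getD []) [] hnd acc
      simp only [List.nil_append, List.length_nil, Nat.cast_zero] at hB
      rw [hB]
      have hcongr := PySem.List.foldl_congr_mem ((rem.get? c).getD [])
        (fun a num => pvGenB ls (rem.insert c (((rem.get? c).getD []).erase num))
          (path ++ [pvTag c num]) a)
        (fun a num => a ++ (pvGenA freq ls (used.insert c
            (PySem.Set.add ((used.get? c).getD PySem.Set.empty) num))).map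
          (fun combo => path ++ (pvTag c num :: combo)))
        acc
        (by
          intro a num hmem
          dsimp only
          rw [ih _ _ _ _ (pvRel_step freq rem used c num hrel)]
          simp)
      rw [hcongr, PySem.List.foldl_append_eq_flatMap]
      -- A side: if-guarded loop → loop over the filtered list = nums → flatMap
      rw [pvGenA_cons]
      rw [PySem.List.foldl_if_eq_foldl_filter
            (p := fun num => !(PySem.Set.contains ((used.get? c).getD PySem.Set.empty) num))
            (f := fun res num =>
              res ++ (pvGenA freq ls (used.insert c
                  (PySem.Set.add ((used.get? c).getD PySem.Set.empty) num))).map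
                (fun combo => pvTag c num :: combo))]
      rw [← hnums, PySem.List.foldl_append_eq_flatMap]
      simp [List.map_flatMap, List.map_map, Function.comp_def]

-- lookups through the dict-comprehension fold
lemma pvCompFold_not_mem (G : Char × Int → List Int) :
    ∀ (pairs : List (Char × Int)) (d0 : PySem.Dict Char (List Int)) (c : Char),
      c ∉ pairs.map Prod.fst →
      (pairs.foldl (fun d p => d.insert p.1 (G p)) d0).get? c = d0.get? c := by
  intro pairs
  induction pairs with
  | nil => intro d0 c _; rfl
  | cons kv rest ih =>
      intro d0 c hc
      simp only [List.map_cons, List.mem_cons, not_or] at hc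
      rw [List.foldl_cons, ih _ _ hc.2, PySem.Dict.get?_insert_of_ne _ _ hc.1]

lemma pvCompFold_mem (G : Char × Int → List Int) :
    ∀ (pairs : List (Char × Int)) (d0 : PySem.Dict Char (List Int)) (c : Char) (f : Int),
      (pairs.map Prod.fst).Nodup → (c, f) ∈ pairs →
      (pairs.foldl (fun d p => d.insert p.1 (G p)) d0).get? c = some (G (c, f)) := by
  intro pairs
  induction pairs with
  | nil => intro _ _ _ _ h; simp at h
  | cons kv rest ih =>
      intro d0 c f hnd hmem
      obtain ⟨k, v⟩ := kv
      simp only [List.map_cons, List.nodup_cons] at hnd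
      rw [List.foldl_cons]
      rcases List.mem_cons.mp hmem with heq | hrest
      · simp only [Prod.mk.injEq] at heq
        obtain ⟨hc, hf⟩ := heq
        subst hc; subst hf
        rw [pvCompFold_not_mem G rest _ c hnd.1, PySem.Dict.get?_insert_self]
      · exact ih _ _ _ hnd.2 hrest

-- the initial states are related
lemma pvRel_init (lf : PySem.Dict Char Int) (hnd : lf.keys.Nodup) :
    pvRel lf
      (lf.items.foldl (fun d p => d.insert p.1 (PySem.List.pyRange 1 (p.2 + 1) 1)) PySem.Dict.empty)
      PySem.Dict.empty := by
  intro c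
  have hkeys : lf.items.map Prod.fst = lf.keys := rfl
  have hused : ((PySem.Dict.empty.get? c (ν := PySem.Set Int)).getD PySem.Set.empty) = PySem.Set.empty := by
    rw [PySem.Dict.get?_empty]; rfl
  rw [hused]
  have hfilter : ∀ l : List Int,
      l.filter (fun n => !(PySem.Set.contains PySem.Set.empty n)) = l := by
    intro l; simp [PySem.Set.empty, PySem.Set.contains]
  rw [hfilter]
  cases hget : lf.get? c with
  | none =>
      have hcnot : c ∉ lf.items.map Prod.fst := by
        rw [hkeys]; exact (PySem.Dict.get?_eq_none_iff_not_mem_keys _ _).mp hget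
      rw [pvCompFold_not_mem (fun p => PySem.List.pyRange 1 (p.2 + 1) 1) _ _ _ hcnot,
        PySem.Dict.get?_empty]
      have hgd : lf.getD c 0 = 0 := PySem.Dict.getD_of_get?_eq_none _ _ hget
      rw [hgd]
      simp [PySem.List.pyRange_one_eq_nil]
  | some f =>
      have hmem : (c, f) ∈ lf.items := PySem.Dict.mem_items_of_get?_eq_some _ hget
      rw [pvCompFold_mem (fun p => PySem.List.pyRange 1 (p.2 + 1) 1) _ _ _ _ (hkeys ▸ hnd) hmem]
      have hgd : lf.getD c 0 = f := PySem.Dict.getD_of_get?_eq_some _ _ hget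
      rw [hgd]
      rfl

-- ===== VERDICT (by name: the statement is the Claim_ definition above) =====
theorem generate_all_unique_combinations_spec : Claim_equal_generate_all_unique_combinations := by
  intro letters _
  unfold Spec_generate_all_unique_combinations
  unfold generate_all_unique_combinations generate_all_unique_combinations_alt
  have hnd : (pvBuildFreq letters.toList).keys.Nodup := by
    unfold pvBuildFreq
    exact PySem.Dict.nodup_keys_foldl_insert _ _ _ PySem.Dict.nodup_keys_empty
  rw [pvGenBA (pvBuildFreq letters.toList) letters.toList _ _ [] []
      (pvRel_init _ hnd)]
  simp
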